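-- pv_equiv track=rewrite | github.com/miliar/Code_Jam_Webscraper | solutions_python/Problem_74/280.py | solve
-- ===== SOURCE A (Python) =====
-- def solve(points):
-- 	pos = [1,1]
-- 	extra_time = [0,0]
-- 	total_time = 0
-- 	for point in points:
-- 		move_time = (max(abs(point[1] - pos[point[0]]) - extra_time[point[0]],0) + 1)
-- 		total_time += move_time
-- 		pos[point[0]] = point[1]
-- 		extra_time[point[0]] = 0
-- 		extra_time[1 - point[0]] += move_time
-- 	return total_time
-- ===== SOURCE B (Python) =====
-- def solve(points):
--     # Stage 1: reduce the input to a list of (arm, distance) moves.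
--     last = {0: 1, 1: 1}
--     moves = []
--     for arm, y in points:
--         moves.append((arm, abs(y - last[arm])))
--         last[arm] = y
--     # Stage 2: scheduling recurrence — each move finishes at
--     # max(previous finish overall, this arm's previous finish + travel) + 1.
--     finish = (0, 0)
--     t = 0
--     for arm, d in moves:
--         t = max(t, finish[arm] + d) + 1
--         finish = (t, finish[1]) if arm == 0 else (finish[0], t)
--     return t
-- ===== Notes on version B (the rewrite author's own statement) =====
-- stated objective: alternative
-- what changed: B is two staged passes: first it reduces the input to (arm, travel-distance) moves, then it runs a machine-scheduling recurrence t = max(t, finish[arm] + d) + 1 on per-arm finish times, eliminating A's eagerly maintained extra_time credit and its max(dist - credit, 0) clamp.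
import Mathlib
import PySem

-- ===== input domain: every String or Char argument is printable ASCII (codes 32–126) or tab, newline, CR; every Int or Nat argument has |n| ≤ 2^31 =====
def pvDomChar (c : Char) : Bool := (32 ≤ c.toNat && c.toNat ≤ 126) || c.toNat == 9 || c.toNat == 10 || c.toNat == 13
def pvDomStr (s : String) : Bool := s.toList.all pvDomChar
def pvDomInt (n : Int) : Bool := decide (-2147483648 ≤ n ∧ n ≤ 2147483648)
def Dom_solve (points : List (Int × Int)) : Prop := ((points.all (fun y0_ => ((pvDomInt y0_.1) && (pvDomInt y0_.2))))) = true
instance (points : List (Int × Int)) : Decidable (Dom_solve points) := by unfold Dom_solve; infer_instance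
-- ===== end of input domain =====

-- B splits A's single credit-accumulating loop into two passes (distance extraction, then a
-- per-arm finish-time scheduling recurrence without the max(.,0) clamp). Objective: alternative.


-- ===== PORT A =====
-- A's two-element Python lists pos / extra_time are modelled as two Int state components each
-- (exact for arm ∈ {0,1}, which Pre_solve guarantees; on any other arm Python raises IndexError).
def solveGo : List (Int × Int) → Int → Int → Int → Int → Int → Int
  | [], _, _, _, _, total => total
  | p :: ps, pos0, pos1, e0, e1, total =>
    let move := max (|p.2 - (if p.1 = 0 then pos0 else pos1)| - (if p.1 = 0 then e0 else e1)) 0 + 1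
    let total' := total + move
    if p.1 = 0 then solveGo ps p.2 pos1 0 (e1 + move) total'
    else solveGo ps pos0 p.2 (e0 + move) 0 total'

def solve (points : List (Int × Int)) : Int := solveGo points 1 1 0 0 0

-- ===== PORT B =====
-- Stage 1: B's dict `last` keyed by arm ∈ {0,1} modelled as two Int components (exact on Pre_solve).
def distGo : List (Int × Int) → Int → Int → List (Int × Int)
  | [], _, _ => []
  | p :: ps, l0, l1 =>
    (p.1, |p.2 - (if p.1 = 0 then l0 else l1)|) ::
      (if p.1 = 0 then distGo ps p.2 l1 else distGo ps l0 p.2)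

-- Stage 2: B's pair `finish` modelled as two Int components.
def schedGo : List (Int × Int) → Int → Int → Int → Int
  | [], _, _, t => t
  | m :: ms, f0, f1, t =>
    let t' := max t ((if m.1 = 0 then f0 else f1) + m.2) + 1
    if m.1 = 0 then schedGo ms t' f1 t' else schedGo ms f0 t' t'

def solve_alt (points : List (Int × Int)) : Int := schedGo (distGo points 1 1) 0 0 0

-- ===== PRECONDITION & SPEC =====
-- Pre_solve: every arm index is 0 or 1 — on any other arm both A and B raise (IndexError / KeyError).
def Pre_solve (points : List (Int × Int)) : Prop := ∀ p ∈ points, p.1 = 0 ∨ p.1 = 1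
instance (points : List (Int × Int)) : Decidable (Pre_solve points) := by unfold Pre_solve; infer_instance
def pvWitness_solve : (List (Int × Int)) := [(0, 5), (1, 3), (0, 2)]
def Spec_solve (points : List (Int × Int)) (out : Int) : Prop := out = solve_alt points
instance (points : List (Int × Int)) (out : Int) : Decidable (Spec_solve points out) := by unfold Spec_solve; infer_instance

-- ===== CLAIM (what is proved, stated in full; the proofs are below) =====
def Claim_equal_solve : Prop := ∀ (points : List (Int × Int)), Dom_solve points → Pre_solve points → Spec_solve points (solve points)

-- ===== LEMMAS AND PROOFS =====
-- Invariant tying the fused loop to the staged passes: B's finish times satisfy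
-- f_a = total - extra_a, and total + (max (d - e) 0 + 1) = max total ((total - e) + d) + 1.
theorem solveGo_eq_staged (ps : List (Int × Int)) :
    ∀ (pos0 pos1 e0 e1 total : Int),
      solveGo ps pos0 pos1 e0 e1 total
        = schedGo (distGo ps pos0 pos1) (total - e0) (total - e1) total := by
  induction ps with
  | nil => intro _ _ _ _ _; rfl
  | cons p ps ih =>
    intro pos0 pos1 e0 e1 total
    by_cases h : p.1 = 0
    · simp only [solveGo, distGo, schedGo, h, if_true]
      rw [ih]
      have harith : total + (max (|p.2 - pos0| - e0) 0 + 1)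
          = max total (total - e0 + |p.2 - pos0|) + 1 := by omega
      rw [harith]
      congr 1 <;> omega
    · simp only [solveGo, distGo, schedGo, h, if_false]
      rw [ih]
      have harith : total + (max (|p.2 - pos1| - e1) 0 + 1)
          = max total (total - e1 + |p.2 - pos1|) + 1 := by omega
      rw [harith]
      congr 1 <;> omega

-- ===== VERDICT (by name: the statement is the Claim_ definition above) =====
theorem solve_spec : Claim_equal_solve := by
  intro points _ _
  unfold Spec_solve solve solve_alt
  simpa using solveGo_eq_staged points 1 1 0 0 0
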